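-- pv_equiv track=rewrite | github.com/alexKleider/MyLib | limit_line_length.py | split_on_space_closest_to_max_len
-- ===== SOURCE A (Python) =====
-- def split_on_space_closest_to_max_len(line, max_len):
--     """
--     Returns a tuple of two (possibly empty) strings.
--     If the line is <= <max_len>: it is returned as t[0] & t[1] is ''.
--     If indented beyond <max_len> t[0] is '' & t[1] is line[max_len:]
--     If there are no spaces then t[0] is <line> and t[1] is ''.
--     If the first space is beyond <max_len>: t[0] is up to the space
--     and t[1] what was after the space.
--     Otherwise the line is broken at a space such that t[0] is the
--     longest it can be up to max_len and t[1] is what comes after the space.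
--     Trailing spaces are stripped.
--     """
--     line = line.rstrip()
--     line_length = len(line)
--     if line_length <= max_len:  # simplest scenario
--         return (line, '')       # empty lines included
--     original_line = line
--     unindented_line = line.lstrip()
--     n_leading_spaces = line_length - len(unindented_line)
--     if n_leading_spaces > max_len:  # big indentation!!!
--         return ('', line[max_len:])
--     indentation = unindented_line[:n_leading_spaces]
--     max_len -= n_leading_spaces
--     i_last_space = unindented_line.rfind(' ')
--     if i_last_space == -1:  # no spaces on which to split
--         return (line, '')
--     i_space = unindented_line.find(' ')
--     if i_space > max_len:
--         return (indentation + unindented_line[:i_space],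
--                 unindented_line[i_space+1:])
--     while True:
--         next_space = unindented_line.find(' ', i_space+1)
--         if (next_space == -1) or (next_space > max_len):
--             break
--         i_space =next_space
--     return (indentation + unindented_line[:i_space],
--             unindented_line[i_space +1:])
-- ===== SOURCE B (Python) =====
-- def split_on_space_closest_to_max_len(line, max_len):
--     """Split at the space closest to max_len (single reverse rfind search
--     instead of A's iterated forward find loop; preserves the real leading
--     whitespace rather than a copy of the line's first characters)."""
--     line = line.rstrip()
--     if len(line) <= max_len:
--         return (line, '')
--     unindented = line.lstrip()
--     n_leading = len(line) - len(unindented)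
--     if n_leading > max_len:
--         return ('', line[max_len:])
--     indentation = line[:n_leading]
--     max_len -= n_leading
--     if ' ' not in unindented:
--         return (line, '')
--     idx = unindented.rfind(' ', 0, max_len + 1)
--     if idx == -1:  # first space lies beyond max_len: split there anyway
--         idx = unindented.find(' ')
--     return (indentation + unindented[:idx], unindented[idx + 1:])
-- ===== Notes on version B (the rewrite author's own statement) =====
-- stated objective: simpler
-- what changed: The forward while-loop that repeatedly advances to the next space is replaced by a single reverse search (rfind with an end bound of max_len+1, falling back to the first space), and the indentation is taken from the line's real leading whitespace instead of A's copy of the unindented text's first characters.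
-- intended difference: On lines that, after stripping, are longer than max_len, start with 1..max_len whitespace characters and contain a space in their unindented part, A prefixes the split-off first part with the first n_leading characters of the unindented text (e.g. ' a b c', 4 -> ('aa b', 'c')); B prefixes it with the line's actual leading whitespace ((' a b', 'c')), which is the indentation the function means to preserve. — e.g. on split_on_space_closest_to_max_len(" a b c", 4): A returns ("aa b", "c"), B returns (" a b", "c")
import Mathlib
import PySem

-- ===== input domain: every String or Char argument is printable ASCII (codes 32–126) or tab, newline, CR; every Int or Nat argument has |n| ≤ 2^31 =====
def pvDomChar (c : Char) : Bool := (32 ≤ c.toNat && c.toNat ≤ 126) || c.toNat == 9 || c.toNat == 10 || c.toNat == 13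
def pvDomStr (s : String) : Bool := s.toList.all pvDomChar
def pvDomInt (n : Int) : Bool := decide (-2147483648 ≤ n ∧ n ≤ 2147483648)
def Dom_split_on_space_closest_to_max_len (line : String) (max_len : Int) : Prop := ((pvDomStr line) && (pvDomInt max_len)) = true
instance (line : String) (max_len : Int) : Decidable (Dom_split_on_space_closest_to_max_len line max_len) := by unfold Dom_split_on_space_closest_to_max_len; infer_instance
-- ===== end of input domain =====

-- B replaces A's iterated forward find-loop by one reverse rfind search and keeps the line's
-- real leading whitespace as the indentation (A re-uses the first characters of the unindented
-- text instead).

-- ===== PORT A =====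
-- A's `while True` loop: repeatedly advance to the next space while it is ≤ max_len.
-- The fuel argument only makes the recursion structural; u.length + 1 steps always suffice
-- (each iteration strictly increases the index, which stays below u.length).
def loopA (u : List Char) (m : Int) (i : Int) : Nat → Int
  | 0 => i
  | fuel + 1 =>
    let ns := PySem.Chars.findFrom u [' '] (i + 1)
    if ns = -1 ∨ m < ns then i else loopA u m ns fuel

def split_on_space_closest_to_max_len (line : String) (max_len : Int) : String × String :=
  let l := PySem.Chars.rstrip line.toList             -- line = line.rstrip()
  if (l.length : Int) ≤ max_len then (String.ofList l, "")
  else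
    let u := PySem.Chars.lstrip l                     -- unindented_line
    let n : Int := (l.length : Int) - (u.length : Int)
    if max_len < n then ("", String.ofList (PySem.Chars.slice l (some max_len) none))
    else
      let ind := PySem.Chars.slice u none (some n)    -- indentation = unindented_line[:n]
      let m := max_len - n                            -- max_len -= n_leading_spaces
      if PySem.Chars.rfind u [' '] = -1 then (String.ofList l, "")
      else
        let i0 := PySem.Chars.find u [' ']            -- i_space
        if m < i0 then
          (String.ofList (ind ++ PySem.Chars.slice u none (some i0)),
           String.ofList (PySem.Chars.slice u (some (i0 + 1)) none))
        else
          let i := loopA u m i0 (u.length + 1)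
          (String.ofList (ind ++ PySem.Chars.slice u none (some i)),
           String.ofList (PySem.Chars.slice u (some (i + 1)) none))

-- ===== PORT B =====
def split_on_space_closest_to_max_len_alt (line : String) (max_len : Int) : String × String :=
  let l := PySem.Chars.rstrip line.toList
  if (l.length : Int) ≤ max_len then (String.ofList l, "")
  else
    let u := PySem.Chars.lstrip l
    let n : Int := (l.length : Int) - (u.length : Int)
    if max_len < n then ("", String.ofList (PySem.Chars.slice l (some max_len) none))
    else
      let ind := PySem.Chars.slice l none (some n)    -- indentation = line[:n]
      let m := max_len - n
      if PySem.Chars.isIn [' '] u = false then (String.ofList l, "")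
      else
        let cand := PySem.Chars.rfindFrom u [' '] 0 (some (m + 1))
        let idx := if cand = -1 then PySem.Chars.find u [' '] else cand
        (String.ofList (ind ++ PySem.Chars.slice u none (some idx)),
         String.ofList (PySem.Chars.slice u (some (idx + 1)) none))

-- ===== PRECONDITION & SPEC =====
-- On indented long lines that get split at a space, A returns the first characters of the
-- unindented text in place of the indentation (e.g. ' a b c', 4 ↦ ('aa b', 'c')); B returns
-- the line's real leading whitespace (' a b', 'c'), which is the intended indentation.
def D_split_on_space_closest_to_max_len (line : String) (max_len : Int) : Prop :=
  let cs := line.toList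
  let trimmed := cs.length - (cs.reverse.takeWhile PySem.Chars.isspace).length
  let n := ((cs.take trimmed).takeWhile PySem.Chars.isspace).length
  max_len < (trimmed : Int) ∧ 0 < n ∧ (n : Int) ≤ max_len ∧ ' ' ∈ (cs.take trimmed).drop n
instance (line : String) (max_len : Int) : Decidable (D_split_on_space_closest_to_max_len line max_len) := by
  unfold D_split_on_space_closest_to_max_len; infer_instance

def Spec_split_on_space_closest_to_max_len (line : String) (max_len : Int) (out : String × String) : Prop :=
  ¬ D_split_on_space_closest_to_max_len line max_len → out = split_on_space_closest_to_max_len_alt line max_len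
instance (line : String) (max_len : Int) (out : String × String) : Decidable (Spec_split_on_space_closest_to_max_len line max_len out) := by
  unfold Spec_split_on_space_closest_to_max_len; infer_instance

def pvDiffWitness_split_on_space_closest_to_max_len : String × Int := (" a b c", 4)
def pvDiffWitnessOut_split_on_space_closest_to_max_len : (String × String) × (String × String) :=
  (("aa b", "c"), (" a b", "c"))

-- ===== CLAIM (what is proved, stated in full; the proofs are below) =====
def Claim_unchanged_split_on_space_closest_to_max_len : Prop := ∀ (line : String) (max_len : Int), Dom_split_on_space_closest_to_max_len line max_len → Spec_split_on_space_closest_to_max_len line max_len (split_on_space_closest_to_max_len line max_len)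
def Claim_changed_split_on_space_closest_to_max_len : Prop := Dom_split_on_space_closest_to_max_len (pvDiffWitness_split_on_space_closest_to_max_len.1) (pvDiffWitness_split_on_space_closest_to_max_len.2) ∧ D_split_on_space_closest_to_max_len (pvDiffWitness_split_on_space_closest_to_max_len.1) (pvDiffWitness_split_on_space_closest_to_max_len.2) ∧ split_on_space_closest_to_max_len (pvDiffWitness_split_on_space_closest_to_max_len.1) (pvDiffWitness_split_on_space_closest_to_max_len.2) = pvDiffWitnessOut_split_on_space_closest_to_max_len.1 ∧ split_on_space_closest_to_max_len_alt (pvDiffWitness_split_on_space_closest_to_max_len.1) (pvDiffWitness_split_on_space_closest_to_max_len.2) = pvDiffWitnessOut_split_on_space_closest_to_max_len.2 ∧ pvDiffWitnessOut_split_on_space_closest_to_max_len.1 ≠ pvDiffWitnessOut_split_on_space_closest_to_max_len.2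
def Claim_exact_split_on_space_closest_to_max_len : Prop := ∀ (line : String) (max_len : Int), Dom_split_on_space_closest_to_max_len line max_len → D_split_on_space_closest_to_max_len line max_len → split_on_space_closest_to_max_len line max_len ≠ split_on_space_closest_to_max_len_alt line max_len

-- ===== LEMMAS AND PROOFS =====

-- `u has a space at position k`
def spaceAt (u : List Char) (k : Nat) : Prop := u[k]? = some ' '

theorem prefix_space_iff (v : List Char) : [' '] <+: v ↔ v.head? = some ' ' := by
  cases v with
  | nil => simp
  | cons h t => simp [List.cons_prefix_cons, eq_comm]

theorem prefix_drop_iff (u : List Char) (k : Nat) : [' '] <+: u.drop k ↔ spaceAt u k := by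
  rw [prefix_space_iff, List.head?_drop]; rfl

theorem spaceAt_isPrefixOf (u : List Char) (k : Nat) :
    List.isPrefixOf [' '] (u.drop k) = true ↔ spaceAt u k := by
  rw [List.isPrefixOf_iff_prefix, prefix_drop_iff]

theorem spaceAt_lt_length {u : List Char} {k : Nat} (h : spaceAt u k) : k < u.length := by
  unfold spaceAt at h
  by_contra hk
  rw [List.getElem?_eq_none (by omega)] at h
  simp at h

theorem spaceAt_drop (u : List Char) (a k : Nat) : spaceAt (u.drop a) k ↔ spaceAt u (a + k) := by
  unfold spaceAt; rw [List.getElem?_drop]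

theorem spaceAt_take (u : List Char) (t k : Nat) : spaceAt (u.take t) k ↔ k < t ∧ spaceAt u k := by
  unfold spaceAt
  constructor
  · intro h
    have hk : k < t := by
      by_contra hk
      rw [List.getElem?_eq_none (by simp; omega)] at h
      simp at h
    exact ⟨hk, by rwa [List.getElem?_take_of_lt hk] at h⟩
  · rintro ⟨hk, h⟩
    rwa [List.getElem?_take_of_lt hk]

theorem isIn_iff_exists_spaceAt (u : List Char) :
    PySem.Chars.isIn [' '] u = true ↔ ∃ k, spaceAt u k := by
  rw [← PySem.Chars.exists_prefix_drop_iff_isIn]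
  exact exists_congr fun k => prefix_drop_iff u k

theorem dropWhile_eq_drop (p : Char → Bool) (v : List Char) :
    v.dropWhile p = v.drop (v.takeWhile p).length := by
  have h : v.drop (v.takeWhile p).length
      = ((v.takeWhile p) ++ (v.dropWhile p)).drop (v.takeWhile p).length := by
    rw [List.takeWhile_append_dropWhile]
  rw [h, List.drop_left]

theorem mem_space_iff (u : List Char) : ' ' ∈ u ↔ ∃ k, spaceAt u k := by
  unfold spaceAt; exact List.mem_iff_getElem?

-- the change region D_, re-stated through the ports' own string primitives
theorem D_iff (line : String) (max_len : Int) :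
    D_split_on_space_closest_to_max_len line max_len ↔
      (max_len < ((PySem.Chars.rstrip line.toList).length : Int) ∧
       0 < ((PySem.Chars.rstrip line.toList).length : Int) -
           ((PySem.Chars.lstrip (PySem.Chars.rstrip line.toList)).length : Int) ∧
       ((PySem.Chars.rstrip line.toList).length : Int) -
           ((PySem.Chars.lstrip (PySem.Chars.rstrip line.toList)).length : Int) ≤ max_len ∧
       PySem.Chars.isIn [' '] (PySem.Chars.lstrip (PySem.Chars.rstrip line.toList)) = true) := by
  simp only [D_split_on_space_closest_to_max_len]
  set cs := line.toList with hcs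
  set j := (cs.reverse.takeWhile PySem.Chars.isspace).length with hj
  have hC1 : PySem.Chars.rstrip cs = cs.take (cs.length - j) := by
    rw [PySem.Chars.rstrip, dropWhile_eq_drop, ← hj, List.drop_reverse, List.reverse_reverse]
  set l := PySem.Chars.rstrip cs with hl
  set n := (l.takeWhile PySem.Chars.isspace).length with hn
  have hn_le : n ≤ l.length := by
    rw [hn]
    simpa using List.IsPrefix.length_le (List.takeWhile_prefix _)
  have hC2 : PySem.Chars.lstrip l = l.drop n := by
    rw [PySem.Chars.lstrip, dropWhile_eq_drop, ← hn]
  have hlen : l.length = cs.length - j := by rw [hC1]; simp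
  have hulen : (PySem.Chars.lstrip l).length = l.length - n := by rw [hC2]; simp
  have e1 : ((cs.take (cs.length - j)).takeWhile PySem.Chars.isspace).length = n := by
    rw [← hC1]
  have e3 : (' ' ∈ (cs.take (cs.length - j)).drop n) ↔
      PySem.Chars.isIn [' '] (PySem.Chars.lstrip l) = true := by
    rw [← hC1, ← hC2, isIn_iff_exists_spaceAt, mem_space_iff]
  rw [e1]
  constructor
  · rintro ⟨a, b, c, d⟩
    exact ⟨by omega, by omega, by omega, e3.mp d⟩
  · rintro ⟨a, b, c, d⟩
    exact ⟨by omega, by omega, by omega, e3.mpr d⟩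

theorem find_space_neg_iff (v : List Char) : PySem.Chars.find v [' '] = -1 ↔ ∀ k, ¬ spaceAt v k := by
  rw [PySem.Chars.find_eq_neg_one_iff]
  constructor
  · intro h k hs
    exact h (((prefix_drop_iff v k).mpr hs).isInfix.trans (List.drop_suffix k v).isInfix)
  · intro h hinf
    obtain ⟨j, hj⟩ := (PySem.Chars.exists_prefix_drop_iff_isIn (sub := [' ']) (s := v)).mpr
      ((PySem.Chars.isIn_iff_infix _ _).mpr hinf)
    exact h j ((prefix_drop_iff v j).mp hj)

theorem find_space_spec (v : List Char) (h : PySem.Chars.find v [' '] ≠ -1) :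
    0 ≤ PySem.Chars.find v [' '] ∧ spaceAt v (PySem.Chars.find v [' ']).toNat ∧
      ∀ k < (PySem.Chars.find v [' ']).toNat, ¬ spaceAt v k := by
  have h0 : 0 ≤ PySem.Chars.find v [' '] := by
    have := PySem.Chars.neg_one_le_find v [' ']
    omega
  obtain ⟨h1, h2⟩ := PySem.Chars.find_spec (s := v) (sub := [' ']) h0
  exact ⟨h0, (prefix_drop_iff _ _).mp h1, fun k hk hs => h2 k hk ((prefix_drop_iff _ _).mpr hs)⟩

theorem findFrom_succ (u : List Char) (i : Int) (h0 : 0 ≤ i) :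
    PySem.Chars.findFrom u [' '] (i + 1) none =
      if u.length < (i + 1).toNat then -1
      else if PySem.Chars.find (u.drop (i + 1).toNat) [' '] = -1 then -1
      else (i + 1) + PySem.Chars.find (u.drop (i + 1).toNat) [' '] := by
  rw [PySem.Chars.findFrom]
  simp only [if_neg (show ¬(i + 1 < 0) by omega), Int.toNat_natCast, List.take_length]
  by_cases hlen : (u.length : Int) < i + 1
  · have h1 : u.length < (i + 1).toNat := by omega
    rw [if_pos hlen, if_pos h1]
  · have h1 : ¬ (u.length < (i + 1).toNat) := by omega
    rw [if_neg hlen, if_neg h1]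

-- characterization of PySem.Chars.rfind.go on the singleton [' ']
theorem rfindGo_spec (u : List Char) (j : Nat) :
    (PySem.Chars.rfind.go u [' '] j = -1 ∧ ∀ k ≤ j, ¬ spaceAt u k) ∨
    (∃ c : Nat, PySem.Chars.rfind.go u [' '] j = (c : Int) ∧ c ≤ j ∧ spaceAt u c ∧
      ∀ k, c < k → k ≤ j → ¬ spaceAt u k) := by
  induction j with
  | zero =>
    rw [PySem.Chars.rfind.go]
    by_cases h : List.isPrefixOf [' '] u = true
    · right
      refine ⟨0, by simp [h], le_refl 0, ?_, by omega⟩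
      have := (spaceAt_isPrefixOf u 0).mp (by simpa using h)
      simpa using this
    · left
      refine ⟨by simp [h], ?_⟩
      intro k hk
      interval_cases k
      intro hs
      exact h (by simpa using (spaceAt_isPrefixOf u 0).mpr hs)
  | succ j ih =>
    rw [PySem.Chars.rfind.go]
    by_cases h : List.isPrefixOf [' '] (u.drop (j + 1)) = true
    · right
      exact ⟨j + 1, by simp [h], le_refl _, (spaceAt_isPrefixOf u (j + 1)).mp h,
        fun k h1 h2 => by omega⟩
    · have hno : ¬ spaceAt u (j + 1) := fun hs => h ((spaceAt_isPrefixOf u (j + 1)).mpr hs)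
      rcases ih with ⟨he, hall⟩ | ⟨c, he, hc, hs, hmax⟩
      · left
        refine ⟨by simp [h]; simpa using he, ?_⟩
        intro k hk
        rcases Nat.lt_or_ge k (j + 1) with hk' | hk'
        · exact hall k (by omega)
        · have : k = j + 1 := by omega
          rw [this]; exact hno
      · right
        refine ⟨c, by simp [h]; simpa using he, by omega, hs, ?_⟩
        intro k h1 h2
        rcases Nat.lt_or_ge k (j + 1) with hk' | hk'
        · exact hmax k h1 (by omega)
        · have : k = j + 1 := by omega
          rw [this]; exact hno

-- A's loop returns the greatest space index ≤ m, given enough fuel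
theorem loopA_eq (u : List Char) (m : Int) (c : Nat) (hc : spaceAt u c) (hcm : (c : Int) ≤ m)
    (hmax : ∀ k, c < k → (k : Int) ≤ m → ¬ spaceAt u k) :
    ∀ (fuel i : Nat), spaceAt u i → i ≤ c → c - i < fuel →
      loopA u m (i : Int) fuel = (c : Int) := by
  intro fuel
  induction fuel with
  | zero => intro i _ _ h; omega
  | succ fuel ih =>
    intro i hi hic hfuel
    rw [loopA]
    simp only [findFrom_succ u (i : Int) (by positivity)]
    by_cases hA : u.length < ((i : Int) + 1).toNat
    · have hlc := spaceAt_lt_length hc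
      have hie : i = c := by omega
      simp only [if_pos hA]
      rw [if_pos (Or.inl trivial)]
      omega
    · simp only [if_neg hA]
      have htn : ((i : Int) + 1).toNat = i + 1 := by omega
      by_cases hB : PySem.Chars.find (u.drop ((i : Int) + 1).toNat) [' '] = -1
      · simp only [if_pos hB]
        rw [if_pos (Or.inl trivial)]
        have hie : i = c := by
          by_contra hne
          have hlt : i < c := by omega
          have : spaceAt (u.drop ((i : Int) + 1).toNat) (c - (i + 1)) := by
            rw [spaceAt_drop, htn]
            have : i + 1 + (c - (i + 1)) = c := by omega
            rwa [this]
          exact (find_space_neg_iff _).mp hB _ this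
        omega
      · simp only [if_neg hB]
        obtain ⟨hf0, hfs, hfmin⟩ := find_space_spec _ hB
        set f := PySem.Chars.find (u.drop ((i : Int) + 1).toNat) [' '] with hfdef
        have hjs : spaceAt u (i + 1 + f.toNat) := by
          have := (spaceAt_drop u (i + 1) f.toNat).mp (by rwa [← htn])
          exact this
        by_cases hC : m < (i : Int) + 1 + f
        · rw [if_pos (Or.inr hC)]
          have hie : i = c := by
            by_contra hne
            have hlt : i < c := by omega
            have hsd : spaceAt (u.drop ((i : Int) + 1).toNat) (c - (i + 1)) := by
              rw [spaceAt_drop, htn]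
              have : i + 1 + (c - (i + 1)) = c := by omega
              rwa [this]
            have hge : ¬ (c - (i + 1) < f.toNat) := fun hlt' => hfmin _ hlt' hsd
            omega
          omega
        · rw [if_neg (by rw [not_or]; exact ⟨by omega, hC⟩)]
          have hj : (i : Int) + 1 + f = ((i + 1 + f.toNat : Nat) : Int) := by omega
          rw [hj]
          have hjc : i + 1 + f.toNat ≤ c := by
            by_contra hgt
            exact hmax (i + 1 + f.toNat) (by omega) (by omega) hjs
          exact ih (i + 1 + f.toNat) hjs hjc (by omega)

-- B's rfindFrom: the greatest space index ≤ m (m ≥ 0), or -1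
theorem rfindFrom_spec (u : List Char) (m : Int) (hm : 0 ≤ m) :
    (PySem.Chars.rfindFrom u [' '] 0 (some (m + 1)) = -1 ∧ ∀ k : Nat, (k : Int) ≤ m → ¬ spaceAt u k) ∨
    (∃ c : Nat, PySem.Chars.rfindFrom u [' '] 0 (some (m + 1)) = (c : Int) ∧ (c : Int) ≤ m ∧ spaceAt u c ∧
      ∀ k, c < k → (k : Int) ≤ m → ¬ spaceAt u k) := by
  rw [PySem.Chars.rfindFrom]
  simp only [if_neg (show ¬((0:Int) < 0) from lt_irrefl 0), Int.toNat_zero, List.drop_zero]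
  have he : ∃ e : Int, 0 ≤ e ∧
      (if (u.length : Int) < m + 1 then (u.length : Int) else if m + 1 < 0 then (if m + 1 + u.length < 0 then 0 else m + 1 + u.length) else m + 1) = e ∧
      (∀ k : Nat, spaceAt (u.take e.toNat) k ↔ (spaceAt u k ∧ (k : Int) ≤ m)) := by
    by_cases hne : (u.length : Int) < m + 1
    · refine ⟨u.length, by omega, by rw [if_pos hne], ?_⟩
      intro k
      rw [spaceAt_take]
      constructor
      · rintro ⟨hk, hs⟩; exact ⟨hs, by omega⟩
      · rintro ⟨hs, hk⟩; exact ⟨by have := spaceAt_lt_length hs; omega, hs⟩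
    · refine ⟨m + 1, by omega, by rw [if_neg hne, if_neg (by omega)], ?_⟩
      intro k
      rw [spaceAt_take]
      constructor
      · rintro ⟨hk, hs⟩; exact ⟨hs, by omega⟩
      · rintro ⟨hs, hk⟩; exact ⟨by omega, hs⟩
  obtain ⟨e, he0, heq, hiff⟩ := he
  rw [heq]
  rw [PySem.Chars.rfind]
  rcases rfindGo_spec (u.take e.toNat) (u.take e.toNat).length with ⟨hgo, hall⟩ | ⟨c, hgo, hcle, hcs, hcmax⟩
  · left
    refine ⟨by rw [hgo]; simp, ?_⟩
    intro k hk hs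
    have hv : spaceAt (u.take e.toNat) k := (hiff k).mpr ⟨hs, hk⟩
    exact hall k (by have := spaceAt_lt_length hv; omega) hv
  · right
    obtain ⟨hsu, hcm⟩ := (hiff c).mp hcs
    refine ⟨c, ?_, hcm, hsu, ?_⟩
    · rw [hgo]
      rw [if_neg (by omega)]
      omega
    · intro k h1 h2 hs
      have hv : spaceAt (u.take e.toNat) k := (hiff k).mpr ⟨hs, h2⟩
      exact hcmax k h1 (by have := spaceAt_lt_length hv; omega) hv

theorem head?_take_pos {t : Nat} (xs : List Char) (h : 0 < t) : (xs.take t).head? = xs.head? := by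
  cases xs with
  | nil => simp
  | cons a l =>
    cases t with
    | zero => omega
    | succ t => simp

theorem head?_dropWhile_false (p : Char → Bool) (l : List Char) (c : Char)
    (h : (l.dropWhile p).head? = some c) : p c = false := by
  induction l with
  | nil => simp at h
  | cons a t ih =>
    by_cases hp : p a = true
    · rw [List.dropWhile_cons_of_pos hp] at h
      exact ih h
    · rw [List.dropWhile_cons_of_neg hp] at h
      simp at h
      rw [← h]
      simpa using hp

theorem ofList_head_ne {a b x y : List Char} {ca cb : Char} (ha : a.head? = some ca)
    (hb : b.head? = some cb) (hne : ca ≠ cb)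
    (h : String.ofList (a ++ x) = String.ofList (b ++ y)) : False := by
  have h' : a ++ x = b ++ y := by
    have := congrArg String.toList h
    simpa using this
  cases a with
  | nil => simp at ha
  | cons a0 as =>
    cases b with
    | nil => simp at hb
    | cons b0 bs =>
      simp at ha hb
      apply hne
      rw [← ha, ← hb]
      have := congrArg List.head? h'
      simpa using this

-- the two ports' no-space guards agree
theorem rfind_neg_iff_isIn (u : List Char) :
    (PySem.Chars.rfind u [' '] = -1) ↔ PySem.Chars.isIn [' '] u = false := by
  rw [PySem.Chars.rfind, PySem.Chars.isIn_eq_false_iff]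
  constructor
  · intro h hinf
    obtain ⟨j, hj⟩ := (PySem.Chars.exists_prefix_drop_iff_isIn (sub := [' ']) (s := u)).mpr
      ((PySem.Chars.isIn_iff_infix _ _).mpr hinf)
    have hs : spaceAt u j := (prefix_drop_iff u j).mp hj
    rcases rfindGo_spec u u.length with ⟨_, hall⟩ | ⟨c, hgo, _, _, _⟩
    · exact hall j (by have := spaceAt_lt_length hs; omega) hs
    · rw [hgo] at h; omega
  · intro h
    rcases rfindGo_spec u u.length with ⟨hgo, _⟩ | ⟨c, _, _, hcs, _⟩
    · exact hgo
    · exact absurd (((prefix_drop_iff u c).mpr hcs).isInfix.trans (List.drop_suffix c u).isInfix) h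

-- ===== VERDICT (by name: the statement is the Claim_ definition above) =====
theorem split_on_space_closest_to_max_len_spec : Claim_unchanged_split_on_space_closest_to_max_len := by
  intro line max_len _
  unfold Spec_split_on_space_closest_to_max_len
  intro hnd
  rw [D_iff] at hnd
  simp only [split_on_space_closest_to_max_len, split_on_space_closest_to_max_len_alt]
  set l := PySem.Chars.rstrip line.toList with hl
  set u := PySem.Chars.lstrip l with hu
  have hul : u.length ≤ l.length := by
    rw [hu, PySem.Chars.lstrip]; exact List.length_dropWhile_le _ _
  by_cases h1 : (l.length : Int) ≤ max_len
  · simp only [if_pos h1]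
  · simp only [if_neg h1]
    by_cases h2 : max_len < (l.length : Int) - (u.length : Int)
    · simp only [if_pos h2]
    · simp only [if_neg h2]
      by_cases h3 : PySem.Chars.isIn [' '] u = true
      · have hrf : ¬ (PySem.Chars.rfind u [' '] = -1) := by
          rw [rfind_neg_iff_isIn]; simp [h3]
        have h3' : ¬ (PySem.Chars.isIn [' '] u = false) := by simp [h3]
        simp only [if_neg hrf, if_neg h3']
        have hn0 : (l.length : Int) - (u.length : Int) = 0 := by
          by_contra hne
          exact hnd ⟨by omega, by omega, by omega, h3⟩
        rw [hn0]
        simp only [sub_zero]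
        have hm0 : 0 ≤ max_len := by omega
        have hsl : ∀ v : List Char, PySem.Chars.slice v none (some (0 : Int)) = ([] : List Char) := by
          intro v
          rw [PySem.Chars.slice_eq_listSlice, PySem.List.slice_to v (le_refl 0)]
          simp
        rw [hsl u, hsl l]
        simp only [List.nil_append]
        have hfne : PySem.Chars.find u [' '] ≠ -1 := by
          rw [Ne, find_space_neg_iff]
          obtain ⟨k, hk⟩ := (isIn_iff_exists_spaceAt u).mp h3
          exact fun hall => hall k hk
        obtain ⟨hf0, hfs, hfmin⟩ := find_space_spec u hfne
        rcases rfindFrom_spec u max_len hm0 with ⟨hcand, hnone⟩ | ⟨c, hcand, hcm, hcs, hcmax⟩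
        · rw [hcand, if_pos (rfl : (-1 : Int) = -1)]
          have hlt : max_len < PySem.Chars.find u [' '] := by
            by_contra hle
            exact hnone (PySem.Chars.find u [' ']).toNat (by omega) hfs
          rw [if_pos hlt]
        · rw [hcand, if_neg (show (c : Int) ≠ -1 by omega)]
          have hi0c : (PySem.Chars.find u [' ']).toNat ≤ c := by
            by_contra hgt
            exact hfmin c (by omega) hcs
          rw [if_neg (show ¬ (max_len < PySem.Chars.find u [' ']) by omega)]
          have hloop : loopA u max_len (PySem.Chars.find u [' ']) (u.length + 1) = (c : Int) := by
            have hcast : PySem.Chars.find u [' '] = (((PySem.Chars.find u [' ']).toNat : Nat) : Int) := by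
              omega
            rw [hcast]
            exact loopA_eq u max_len c hcs hcm hcmax (u.length + 1) _ hfs hi0c
              (by have := spaceAt_lt_length hcs; omega)
          rw [hloop]
      · have h3' : PySem.Chars.isIn [' '] u = false := by simpa using h3
        have hrf : PySem.Chars.rfind u [' '] = -1 := (rfind_neg_iff_isIn u).mpr h3'
        simp only [if_pos hrf, if_pos h3']

theorem split_on_space_closest_to_max_len_changed : Claim_changed_split_on_space_closest_to_max_len := by
  unfold Claim_changed_split_on_space_closest_to_max_len; decide

theorem split_on_space_closest_to_max_len_tight : Claim_exact_split_on_space_closest_to_max_len := by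
  intro line max_len _ hD
  rw [D_iff] at hD
  simp only [split_on_space_closest_to_max_len, split_on_space_closest_to_max_len_alt]
  set l := PySem.Chars.rstrip line.toList with hl
  set u := PySem.Chars.lstrip l with hu
  obtain ⟨hd1, hd2, hd3, hd4⟩ := hD
  have hul : u.length ≤ l.length := by
    rw [hu, PySem.Chars.lstrip]; exact List.length_dropWhile_le _ _
  have h1 : ¬ (l.length : Int) ≤ max_len := by omega
  have h2 : ¬ max_len < (l.length : Int) - (u.length : Int) := by omega
  have h3' : ¬ (PySem.Chars.isIn [' '] u = false) := by simp [hd4]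
  have hrf : ¬ (PySem.Chars.rfind u [' '] = -1) := by
    rw [rfind_neg_iff_isIn]; simp [hd4]
  simp only [if_neg h1, if_neg h2, if_neg hrf, if_neg h3']
  -- heads of u and l differ: u starts with a non-whitespace char, l with a whitespace one
  have hu_ne : u ≠ [] := by
    obtain ⟨k, hk⟩ := (isIn_iff_exists_spaceAt u).mp hd4
    exact List.ne_nil_of_length_pos (by have := spaceAt_lt_length hk; omega)
  obtain ⟨cu, hcu⟩ : ∃ c, u.head? = some c :=
    ⟨u.head hu_ne, List.head?_eq_some_head hu_ne⟩
  have hcu_sp : PySem.Chars.isspace cu = false := by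
    apply head?_dropWhile_false PySem.Chars.isspace l
    rw [← PySem.Chars.lstrip, ← hu]
    exact hcu
  obtain ⟨cl, hcl, hcl_sp⟩ : ∃ c, l.head? = some c ∧ PySem.Chars.isspace c = true := by
    cases hle : l with
    | nil => rw [hle] at hd2 hul; simp at hd2 hul; omega
    | cons a t =>
      refine ⟨a, rfl, ?_⟩
      by_contra hpa
      have : u = l := by
        rw [hu, PySem.Chars.lstrip, hle, List.dropWhile_cons_of_neg (by simpa using hpa), ← hle]
      rw [this] at hd2
      omega
  have hne : cu ≠ cl := by
    intro h
    rw [h, hcl_sp] at hcu_sp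
    exact Bool.noConfusion hcu_sp
  -- heads of the two indentation slices
  have hAhead : (PySem.Chars.slice u none (some ((l.length : Int) - (u.length : Int)))).head? = some cu := by
    rw [PySem.Chars.slice_eq_listSlice, PySem.List.slice_to u (by omega)]
    rw [head?_take_pos u (by omega)]
    exact hcu
  have hBhead : (PySem.Chars.slice l none (some ((l.length : Int) - (u.length : Int)))).head? = some cl := by
    rw [PySem.Chars.slice_eq_listSlice, PySem.List.slice_to l (by omega)]
    rw [head?_take_pos l (by omega)]
    exact hcl
  by_cases h4 : max_len - ((l.length : Int) - (u.length : Int)) < PySem.Chars.find u [' ']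
  · simp only [if_pos h4]
    intro heq
    exact ofList_head_ne hAhead hBhead hne (congrArg Prod.fst heq)
  · simp only [if_neg h4]
    intro heq
    exact ofList_head_ne hAhead hBhead hne (congrArg Prod.fst heq)
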